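-- pv_equiv track=rewrite | github.com/cmward/atc | scripts/prepare_grammar.py | convert
-- ===== SOURCE A (Python) =====
-- def convert(line):
--     """ Convert a line of .hg grammar to a line of EBNF grammar.
--     Concatenation needs to be made explicit with `,`, nonterminals
--     have `$` removed, `:` becomes `=`,
--
--     The conversion of `+` and `*` have to be done by hand, since
--     EBNF uses brackets to indicate repitition (ie, <expr>* becomes
--     {expr}. This is impossible to do using regexps, since it
--     requires keeping track of matched parens.
--     """
--
--     out = []
--     for i, token in enumerate(line):
--         no_comma = [']', ')', '|', ':', ';']
--         if token == ':':
--             out.append('=')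
--         elif token == '[':
--             out.append(token)
--         elif token == ']':
--             out.append(token)
--             try:
--                 if line[i+1] not in no_comma:
--                     out.append(',')
--             except IndexError:
--                 continue
--         elif token == '(':
--             out.append(token)
--         elif token == ')':
--             out.append(token)
--             try:
--                 if line[i+1] not in no_comma:
--                     out.append(',')
--             except IndexError:
--                 continue
--         elif token == '|':
--             out.append(token)
--         elif token == ';':
--             out.append(token)
--         elif token.startswith('$'):
--             # non-terminal definition
--             if token.endswith(':'):
--                 out.append(token[1:-1])
--                 out.append('=')
--             # nonterminal
--             else:
--                 out.append(token[1:])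
--                 try:
--                     if line[i+1] not in no_comma:
--                         out.append(',')
--                 except IndexError:
--                     continue
--         else:
--             # terminal
--             out.append('"{}"'.format(token))
--             try:
--                 if line[i+1] not in no_comma:
--                     out.append(',')
--             except IndexError:
--                 continue
--     return ' '.join(out)
-- ===== SOURCE B (Python) =====
-- NO_COMMA = frozenset((']', ')', '|', ':', ';'))
--
--
-- def convert(line):
--     # Look-behind state machine: instead of peeking at line[i+1] after each
--     # value-producing token, carry a 'pending' flag and insert the comma
--     # *before* the next token when it is due.
--     out = []
--     pending = False  # did the previous token produce a value?
--     for token in line: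
--         if pending and token not in NO_COMMA:
--             out.append(',')
--         if token == ':':
--             out.append('=')
--             pending = False
--         elif token in ('[', '(', '|', ';'):
--             out.append(token)
--             pending = False
--         elif token in (']', ')'):
--             out.append(token)
--             pending = True
--         elif token.startswith('$'):
--             if token.endswith(':'):
--                 out.append(token[1:-1])
--                 out.append('=')
--                 pending = False
--             else:
--                 out.append(token[1:])
--                 pending = True
--         else:
--             out.append('"' + token + '"')
--             pending = True
--     return ' '.join(out)
-- ===== Notes on version B (the rewrite author's own statement) =====
-- stated objective: alternative
-- what changed: B replaces A's lookahead at line[i+1] guarded by try/except in four branches with a look-behind state machine: a single 'pending' flag carried through the loop inserts the comma before the next token instead of after the current one, so no index arithmetic or exception handling is needed.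
import Mathlib
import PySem

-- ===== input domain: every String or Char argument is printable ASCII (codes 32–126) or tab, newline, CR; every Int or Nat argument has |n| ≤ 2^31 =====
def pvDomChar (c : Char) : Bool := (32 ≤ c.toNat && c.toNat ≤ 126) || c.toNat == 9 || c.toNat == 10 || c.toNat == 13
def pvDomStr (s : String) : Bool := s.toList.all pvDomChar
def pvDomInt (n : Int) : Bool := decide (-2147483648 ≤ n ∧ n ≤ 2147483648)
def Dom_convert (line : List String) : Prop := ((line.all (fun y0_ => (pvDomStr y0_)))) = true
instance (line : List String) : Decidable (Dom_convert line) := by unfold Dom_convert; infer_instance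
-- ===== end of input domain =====

-- B replaces A's lookahead-with-try/except by a look-behind state machine (a pending-comma flag); same output, same O(n) cost.

-- ===== PORT A =====
def aNoComma : List String := ["]", ")", "|", ":", ";"]

-- A's repeated 'try: if line[i+1] not in no_comma: out.append(",") except IndexError: continue';
-- line[i+1] seen from the current loop suffix is rest.head? (none = IndexError)
def aComma (rest : List String) : List String :=
  match rest.head? with
  | some nxt => if nxt ∉ aNoComma then [","] else []
  | none => []

-- A's loop body for one token: the branch chain exactly as written
def convertStep (token : String) (rest : List String) : List String :=
  if token = ":" then ["="]
  else if token = "[" then [token]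
  else if token = "]" then [token] ++ aComma rest
  else if token = "(" then [token]
  else if token = ")" then [token] ++ aComma rest
  else if token = "|" then [token]
  else if token = ";" then [token]
  else if PySem.Str.startswith token "$" then
    (if PySem.Str.endswith token ":" then
      [PySem.Str.slice token (some 1) (some (-1)), "="]
    else [PySem.Str.slice token (some 1) none] ++ aComma rest)
  else ["\"" ++ token ++ "\""] ++ aComma rest

-- A's single loop over the line, accumulating out
def convertLoop : List String → List String
  | [] => []
  | token :: rest => convertStep token rest ++ convertLoop rest

def convert (line : List String) : String :=
  PySem.Str.join " " (convertLoop line)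

-- ===== PORT B =====
def bNoComma : List String := ["]", ")", "|", ":", ";"]

-- B's loop: 'pending' records whether the previous token produced a value;
-- the comma due from it is emitted before the current token's fragments.
def altLoop : List String → Bool → List String
  | [], _ => []
  | token :: rest, pending =>
    (if pending = true ∧ token ∉ bNoComma then [","] else []) ++
    (if token = ":" then "=" :: altLoop rest false
     else if token ∈ (["[", "(", "|", ";"] : List String) then token :: altLoop rest false
     else if token ∈ (["]", ")"] : List String) then token :: altLoop rest true
     else if PySem.Str.startswith token "$" then
       (if PySem.Str.endswith token ":" then
         PySem.Str.slice token (some 1) (some (-1)) :: "=" :: altLoop rest false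
       else PySem.Str.slice token (some 1) none :: altLoop rest true)
     else ("\"" ++ token ++ "\"") :: altLoop rest true)

def convert_alt (line : List String) : String :=
  PySem.Str.join " " (altLoop line false)

-- ===== PRECONDITION & SPEC =====
def Spec_convert (line : List String) (out : String) : Prop := out = convert_alt line
instance (line : List String) (out : String) : Decidable (Spec_convert line out) := by unfold Spec_convert; infer_instance

-- ===== CLAIM (what is proved, stated in full; the proofs are below) =====
def Claim_equal_convert : Prop := ∀ (line : List String), Dom_convert line → Spec_convert line (convert line)

-- ===== LEMMAS AND PROOFS =====
-- proof-only views of B's branch chain: fragments and produced-value flag of one token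
def pFrag (token : String) : List String :=
  if token = ":" then ["="]
  else if token ∈ (["[", "(", "|", ";"] : List String) then [token]
  else if token ∈ (["]", ")"] : List String) then [token]
  else if PySem.Str.startswith token "$" then
    (if PySem.Str.endswith token ":" then
      [PySem.Str.slice token (some 1) (some (-1)), "="]
    else [PySem.Str.slice token (some 1) none])
  else ["\"" ++ token ++ "\""]

def pVal (token : String) : Bool :=
  if token = ":" then false
  else if token ∈ (["[", "(", "|", ";"] : List String) then false
  else if token ∈ (["]", ")"] : List String) then true
  else if PySem.Str.startswith token "$" then
    (if PySem.Str.endswith token ":" then false else true)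
  else true

-- the comma due before the next token, from the pending flag and that token (none = end of line)
def preComma (pending : Bool) (nxt? : Option String) : List String :=
  match nxt? with
  | some nxt => if pending = true ∧ nxt ∉ bNoComma then [","] else []
  | none => []

lemma altLoop_cons (t : String) (rest : List String) (p : Bool) :
    altLoop (t :: rest) p = preComma p (some t) ++ pFrag t ++ altLoop rest (pVal t) := by
  simp only [altLoop, preComma, pFrag, pVal]
  split_ifs <;> simp

lemma step_eq (t : String) (rest : List String) :
    pFrag t ++ preComma (pVal t) rest.head? = convertStep t rest := by
  have hc : ∀ r : List String, preComma true r.head? = aComma r := by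
    intro r; cases r <;> simp [preComma, aComma, bNoComma, aNoComma]
  simp only [pFrag, pVal, convertStep]
  split_ifs <;> simp_all [preComma, aComma] <;> cases rest.head? <;> rfl

lemma altLoop_eq (line : List String) (p : Bool) :
    altLoop line p = preComma p line.head? ++ convertLoop line := by
  induction line generalizing p with
  | nil => simp [altLoop, preComma, convertLoop]
  | cons t rest ih =>
    rw [altLoop_cons, ih, convertLoop, ← step_eq]
    simp [List.append_assoc]

-- ===== VERDICT (by name: the statement is the Claim_ definition above) =====
theorem convert_spec : Claim_equal_convert := by
  intro line _
  unfold Spec_convert convert convert_alt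
  rw [altLoop_eq]
  cases line <;> simp [preComma]
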